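-- pv_equiv track=rewrite | github.com/The-Harsh-Vardhan/TIDAL-Tampered_Image_Detection_And_Localization | Notebooks/scripts/builders/generate_vk7.py | split_source_at_markers
-- ===== SOURCE A (Python) =====
-- def split_source_at_markers(source_str, markers):
--     """
--     Split source code string at comment-based section markers.
--     Returns list of code chunks (strings).
--     Each chunk starts at the marker line.
--     """
--     lines = source_str.split("\n")
--     # Find line indices where markers appear
--     split_indices = [0]
--     for i, line in enumerate(lines):
--         if i == 0:
--             continue
--         stripped = line.strip()
--         for marker in markers:
--             if marker in stripped:
--                 split_indices.append(i)
--                 break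
--
--     chunks = []
--     for idx in range(len(split_indices)):
--         start = split_indices[idx]
--         end = split_indices[idx + 1] if idx + 1 < len(split_indices) else len(lines)
--         chunk_lines = lines[start:end]
--         # Rejoin
--         chunk = "\n".join(chunk_lines)
--         chunks.append(chunk)
--
--     return chunks
-- ===== SOURCE B (Python) =====
-- def split_source_at_markers(source_str, markers):
--     """
--     Split source code string at comment-based section markers.
--     Returns list of code chunks (strings).
--     Each chunk starts at the marker line.
--     """
--     lines = source_str.split("\n")
--     chunks = []
--     buffer = [lines[0]]
--     for line in lines[1:]:
--         stripped = line.strip()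
--         if any(marker in stripped for marker in markers):
--             chunks.append("\n".join(buffer))
--             buffer = [line]
--         else:
--             buffer.append(line)
--     chunks.append("\n".join(buffer))
--     return chunks
-- ===== Notes on version B (the rewrite author's own statement) =====
-- stated objective: simpler
-- what changed: Replaces the two-pass design (build a list of split indices, then slice and rejoin the line list per index pair) with a single streaming pass that keeps a current-chunk buffer, flushing it whenever a marker line is reached.
import Mathlib
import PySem

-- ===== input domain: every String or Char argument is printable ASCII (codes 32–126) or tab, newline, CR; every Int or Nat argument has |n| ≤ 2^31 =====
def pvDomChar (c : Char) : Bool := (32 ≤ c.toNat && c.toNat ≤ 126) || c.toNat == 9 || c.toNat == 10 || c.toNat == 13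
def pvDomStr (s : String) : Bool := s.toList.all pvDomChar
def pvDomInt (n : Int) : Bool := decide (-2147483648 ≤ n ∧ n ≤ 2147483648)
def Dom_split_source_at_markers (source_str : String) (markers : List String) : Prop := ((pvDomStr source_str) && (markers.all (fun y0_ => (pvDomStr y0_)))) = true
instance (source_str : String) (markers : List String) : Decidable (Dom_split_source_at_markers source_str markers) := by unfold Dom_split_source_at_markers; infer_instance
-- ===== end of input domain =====

-- B replaces A's two-pass design (collect split indices, then slice/rejoin) by one
-- streaming pass with a current-chunk buffer flushed at each marker line (objective: simpler).

-- ===== PORT A =====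
-- shared per-line test: "for marker in markers: if marker in stripped: …; break" = any
def lineIsMarker (markers : List String) (line : List Char) : Bool :=
  markers.any (fun m => PySem.Chars.isIn m.toList (PySem.Chars.strip line))

def split_source_at_markers (source_str : String) (markers : List String) : List String :=
  let lines := PySem.Chars.splitOn source_str.toList ['\n']
  let split_indices : List Int :=
    (PySem.List.enumerate lines).foldl
      (fun acc p =>
        if p.1 == 0 then acc
        else if lineIsMarker markers p.2 then acc ++ [p.1] else acc)
      [0]
  (PySem.List.pyRange 0 (split_indices.length : Int) 1).foldl
    (fun chunks idx =>
      let start := PySem.List.pyGetD split_indices idx 0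
      let stop := if idx + 1 < (split_indices.length : Int)
                  then PySem.List.pyGetD split_indices (idx + 1) 0
                  else (lines.length : Int)
      let chunk_lines := PySem.List.slice lines (some start) (some stop)
      chunks ++ [String.ofList (PySem.Chars.join ['\n'] chunk_lines)])
    []

-- ===== PORT B =====
def split_source_at_markers_alt (source_str : String) (markers : List String) : List String :=
  match PySem.Chars.splitOn source_str.toList ['\n'] with
  | [] => []   -- unreachable: str.split always returns at least one piece
  | l0 :: rest =>
    let st := rest.foldl
      (fun (st : List String × List (List Char)) line =>
        if lineIsMarker markers line
        then (st.1 ++ [String.ofList (PySem.Chars.join ['\n'] st.2)], [line])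
        else (st.1, st.2 ++ [line]))
      ([], [l0])
    st.1 ++ [String.ofList (PySem.Chars.join ['\n'] st.2)]

-- ===== PRECONDITION & SPEC =====
def Spec_split_source_at_markers (source_str : String) (markers : List String) (out : List String) : Prop := out = split_source_at_markers_alt source_str markers
instance (source_str : String) (markers : List String) (out : List String) : Decidable (Spec_split_source_at_markers source_str markers out) := by unfold Spec_split_source_at_markers; infer_instance

-- ===== CLAIM (what is proved, stated in full; the proofs are below) =====
def Claim_equal_split_source_at_markers : Prop := ∀ (source_str : String) (markers : List String), Dom_split_source_at_markers source_str markers → Spec_split_source_at_markers source_str markers (split_source_at_markers source_str markers)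

-- ===== LEMMAS AND PROOFS =====

-- one chunk string
def pvJoinNL (buf : List (List Char)) : String := String.ofList (PySem.Chars.join ['\n'] buf)

-- the chunk A's second loop builds at index idx of the split-index list
def pvChunkAt (lines : List (List Char)) (si : List Int) (idx : Int) : String :=
  String.ofList (PySem.Chars.join ['\n'] (PySem.List.slice lines
    (some (PySem.List.pyGetD si idx 0))
    (some (if idx + 1 < (si.length : Int) then PySem.List.pyGetD si (idx + 1) 0 else (lines.length : Int)))))

def pvCasts : List Nat → List Int := List.map (fun n : Nat => (n : Int))

-- positions (within the tail of the line list) of marker lines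
def pvMarkIdxs (markers : List String) : List (List Char) → List Nat
  | [] => []
  | l :: t =>
    if lineIsMarker markers l then 0 :: (pvMarkIdxs markers t).map (· + 1)
    else (pvMarkIdxs markers t).map (· + 1)

-- A's second pass, recast over the (Nat) index list
def pvChunksOf (lines : List (List Char)) : List Nat → List String
  | [] => []
  | [a] => [pvJoinNL ((lines.drop a).take (lines.length - a))]
  | a :: b :: rest => pvJoinNL ((lines.drop a).take (b - a)) :: pvChunksOf lines (b :: rest)

-- B's streaming pass, recast as plain recursion producing the chunk list
def pvStream (markers : List String) (buf : List (List Char)) : List (List Char) → List String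
  | [] => [pvJoinNL buf]
  | l :: t =>
    if lineIsMarker markers l then pvJoinNL buf :: pvStream markers [l] t
    else pvStream markers (buf ++ [l]) t

theorem pv_splitOn_go_ne_nil (sep : List Char) (fuel : Nat) : ∀ (l cur : List Char)
    (acc : List (List Char)), PySem.Chars.splitOn.go sep fuel l cur acc ≠ [] := by
  induction fuel with
  | zero => intro l cur acc; simp [PySem.Chars.splitOn.go]
  | succ n ih =>
    intro l cur acc
    cases l with
    | nil => simp [PySem.Chars.splitOn.go]
    | cons c rest =>
      rw [PySem.Chars.splitOn.go]
      split
      · exact ih _ _ _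
      · exact ih _ _ _

theorem pv_splitOn_ne_nil (s sep : List Char) : PySem.Chars.splitOn s sep ≠ [] := by
  unfold PySem.Chars.splitOn; exact pv_splitOn_go_ne_nil _ _ _ _ _


theorem pv_indices_fold (markers : List String) (ls : List (List Char)) : ∀ (kn : Nat)
    (_hk : 1 ≤ kn) (init : List Int),
    (PySem.List.enumerate ls (kn : Int)).foldl
      (fun acc p =>
        if p.1 == 0 then acc
        else if lineIsMarker markers p.2 then acc ++ [p.1] else acc) init
    = init ++ (pvMarkIdxs markers ls).map (fun j => ((j + kn : Nat) : Int)) := by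
  induction ls with
  | nil => intro kn hk init; simp [PySem.List.enumerate, pvMarkIdxs]
  | cons l t ih =>
    intro kn hk init
    rw [PySem.List.enumerate_cons]
    have hz : (((kn : Int)) == 0) = false := by simp; omega
    simp only [List.foldl_cons, hz, Bool.false_eq_true, if_false]
    have hcast : ((kn : Int) + 1) = ((kn + 1 : Nat) : Int) := by push_cast; ring
    rw [hcast]
    by_cases hm : lineIsMarker markers l
    · rw [if_pos hm, ih (kn+1) (by omega)]
      simp [pvMarkIdxs, hm, List.map_map, List.append_assoc]
      intro j _; ring
    · rw [if_neg hm, ih (kn+1) (by omega)]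
      simp [pvMarkIdxs, hm, List.map_map]
      intro j _; ring


theorem pv_chunkAt_shift (lines : List (List Char)) (x : Int) (si : List Int) (k : Nat) :
    pvChunkAt lines (x :: si) ((k + 1 : Nat) : Int) = pvChunkAt lines si ((k : Nat) : Int) := by
  unfold pvChunkAt
  have h1 : ((k + 1 : Nat) : Int) + 1 = ((k + 2 : Nat) : Int) := by push_cast; ring
  have h3 : ((k : Nat) : Int) + 1 = ((k + 1 : Nat) : Int) := by push_cast; ring
  have h2 : (((k + 2 : Nat) : Int) < ((x :: si).length : Int)) ↔ (((k + 1 : Nat) : Int) < (si.length : Int)) := by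
    push_cast [List.length_cons]; omega
  simp only [h1, h3, PySem.List.pyGetD_natCast, List.getD_cons_succ, h2]

theorem pv_chunks_map (lines : List (List Char)) (idxs : List Nat) :
    (List.range idxs.length).map (fun k => pvChunkAt lines (pvCasts idxs) ((k : Nat) : Int))
    = pvChunksOf lines idxs := by
  induction idxs with
  | nil => simp [pvChunksOf]
  | cons a rest ih =>
    rw [List.length_cons, List.range_succ_eq_map, List.map_cons, List.map_map]
    have htail : (List.range rest.length).map ((fun k => pvChunkAt lines (pvCasts (a :: rest)) ((k : Nat) : Int)) ∘ Nat.succ)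
        = (List.range rest.length).map (fun k => pvChunkAt lines (pvCasts rest) ((k : Nat) : Int)) := by
      apply List.map_congr_left; intro k _
      simpa using pv_chunkAt_shift lines (a : Int) (pvCasts rest) k
    rw [htail, ih]
    cases rest with
    | nil =>
      unfold pvChunkAt pvChunksOf pvJoinNL pvCasts
      simp [PySem.List.pyGetD_ofNat', PySem.List.slice_natCast]
    | cons b rest' =>
      conv_rhs => rw [pvChunksOf]
      congr 1
      unfold pvChunkAt pvJoinNL
      have hc : ((((0:Nat)) : Int) + 1 < ((pvCasts (a :: b :: rest')).length : Int)) := by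
        simp [pvCasts]
      rw [Nat.cast_zero, if_pos (by simpa using hc)]
      simp [pvCasts, PySem.List.pyGetD_ofNat', PySem.List.slice_natCast]

theorem pv_main (markers : List String) (ls : List (List Char)) : ∀ (don buf : List (List Char)),
    pvChunksOf (don ++ buf ++ ls)
      (don.length :: (pvMarkIdxs markers ls).map (fun j => j + don.length + buf.length))
    = pvStream markers buf ls := by
  induction ls with
  | nil =>
    intro don buf
    simp only [pvMarkIdxs, List.map_nil, List.append_nil, pvStream]
    unfold pvChunksOf
    rw [List.drop_left]
    have : (don ++ buf).length - don.length = buf.length := by simp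
    rw [this, List.take_length]
  | cons l t ih =>
    intro don buf
    rw [pvStream]
    by_cases hm : lineIsMarker markers l
    · rw [if_pos hm]
      have hmi : pvMarkIdxs markers (l :: t) = 0 :: (pvMarkIdxs markers t).map (· + 1) := by
        rw [pvMarkIdxs, if_pos hm]
      rw [hmi, List.map_cons, List.map_map]
      have hidx : ((pvMarkIdxs markers t).map ((fun j => j + don.length + buf.length) ∘ (· + 1)))
          = (pvMarkIdxs markers t).map (fun j => j + (don ++ buf).length + [l].length) := by
        apply List.map_congr_left; intro j _; simp; omega
      have hlines : don ++ buf ++ (l :: t) = (don ++ buf) ++ [l] ++ t := by simp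
      rw [pvChunksOf]
      have hhead : pvJoinNL (List.take (0 + don.length + buf.length - don.length)
          (List.drop don.length (don ++ buf ++ (l :: t)))) = pvJoinNL buf := by
        rw [show don ++ buf ++ (l :: t) = don ++ (buf ++ (l :: t)) from by simp, List.drop_left]
        congr 1
        rw [show 0 + don.length + buf.length - don.length = buf.length from by omega, List.take_left]
      rw [hhead, hidx, hlines,
        show 0 + don.length + buf.length = (don ++ buf).length from by simp,
        ih (don ++ buf) [l]]
    · rw [if_neg hm]
      have hmi : pvMarkIdxs markers (l :: t) = (pvMarkIdxs markers t).map (· + 1) := by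
        rw [pvMarkIdxs, if_neg hm]
      rw [hmi, List.map_map]
      have hidx : ((pvMarkIdxs markers t).map ((fun j => j + don.length + buf.length) ∘ (· + 1)))
          = (pvMarkIdxs markers t).map (fun j => j + don.length + (buf ++ [l]).length) := by
        apply List.map_congr_left; intro j _; simp; omega
      rw [hidx, show don ++ buf ++ (l :: t) = don ++ (buf ++ [l]) ++ t from by simp,
        ih don (buf ++ [l])]

theorem pv_stream_fold (markers : List String) (ls : List (List Char)) : ∀
    (chunks : List String) (buf : List (List Char)),
    (let st := ls.foldl
      (fun (st : List String × List (List Char)) line =>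
        if lineIsMarker markers line
        then (st.1 ++ [String.ofList (PySem.Chars.join ['\n'] st.2)], [line])
        else (st.1, st.2 ++ [line]))
      (chunks, buf);
     st.1 ++ [String.ofList (PySem.Chars.join ['\n'] st.2)])
    = chunks ++ pvStream markers buf ls := by
  induction ls with
  | nil => intro chunks buf; simp [pvStream, pvJoinNL]
  | cons l t ih =>
    intro chunks buf
    rw [pvStream]
    by_cases hm : lineIsMarker markers l
    · simp only [List.foldl_cons, hm, if_true]
      rw [ih (chunks ++ [String.ofList (PySem.Chars.join ['\n'] buf)]) [l]]
      simp [pvJoinNL]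
    · simp only [List.foldl_cons, hm, Bool.false_eq_true, if_false]
      rw [ih chunks (buf ++ [l])]

theorem pv_chunks_fold (lines : List (List Char)) (idxs : List Nat) :
    (PySem.List.pyRange 0 (((pvCasts idxs).length : Nat) : Int) 1).foldl
      (fun chunks idx => chunks ++ [pvChunkAt lines (pvCasts idxs) idx]) []
    = pvChunksOf lines idxs := by
  rw [PySem.List.foldl_append_singleton_eq_map]
  simp only [pvCasts, List.length_map]
  rw [PySem.List.pyRange_zero_natCast, List.map_map]
  simpa [pvCasts, Function.comp] using pv_chunks_map lines idxs

-- ===== VERDICT (by name: the statement is the Claim_ definition above) =====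
set_option maxHeartbeats 1000000 in
theorem split_source_at_markers_spec : Claim_equal_split_source_at_markers := by
  intro source_str markers _
  unfold Spec_split_source_at_markers split_source_at_markers split_source_at_markers_alt
  cases h : PySem.Chars.splitOn source_str.toList ['\n'] with
  | nil => exact absurd h (pv_splitOn_ne_nil _ _)
  | cons l0 ls =>
    have hsi : List.foldl
        (fun acc p => if p.1 == 0 then acc else if lineIsMarker markers p.2 then acc ++ [p.1] else acc)
        [0] (PySem.List.enumerate (l0 :: ls))
        = pvCasts (0 :: (pvMarkIdxs markers ls).map (· + 1)) := by
      have e1 : (PySem.List.enumerate (l0 :: ls) : List (Int × List Char))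
          = (0, l0) :: PySem.List.enumerate ls (((1 : Nat) : Int)) := by
        rw [PySem.List.enumerate_cons]; norm_num
      rw [e1, List.foldl_cons]
      simp only [beq_self_eq_true, if_true]
      rw [pv_indices_fold markers ls 1 le_rfl [0]]
      simp only [pvCasts, List.singleton_append, List.map_cons, List.map_map, Nat.cast_zero]
      congr 1
    have hA :
        (List.foldl
          (fun (chunks : List String) (idx : Int) =>
            let start := PySem.List.pyGetD (List.foldl
              (fun acc p => if p.1 == 0 then acc else if lineIsMarker markers p.2 then acc ++ [p.1] else acc)
              [0] (PySem.List.enumerate (l0 :: ls))) idx 0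
            let stop := if idx + 1 < ((List.foldl
              (fun acc p => if p.1 == 0 then acc else if lineIsMarker markers p.2 then acc ++ [p.1] else acc)
              [0] (PySem.List.enumerate (l0 :: ls))).length : Int)
              then PySem.List.pyGetD (List.foldl
                (fun acc p => if p.1 == 0 then acc else if lineIsMarker markers p.2 then acc ++ [p.1] else acc)
                [0] (PySem.List.enumerate (l0 :: ls))) (idx + 1) 0
              else ((l0 :: ls).length : Int)
            let chunk_lines := PySem.List.slice (l0 :: ls) (some start) (some stop)
            chunks ++ [String.ofList (PySem.Chars.join ['\n'] chunk_lines)])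
          [] (PySem.List.pyRange 0 (((List.foldl
              (fun acc p => if p.1 == 0 then acc else if lineIsMarker markers p.2 then acc ++ [p.1] else acc)
              [0] (PySem.List.enumerate (l0 :: ls))).length : Int)) 1))
        = pvChunksOf (l0 :: ls) (0 :: (pvMarkIdxs markers ls).map (· + 1)) := by
      simp only [hsi]
      exact pv_chunks_fold (l0 :: ls) (0 :: (pvMarkIdxs markers ls).map (· + 1))
    have hmain : pvChunksOf (l0 :: ls) (0 :: (pvMarkIdxs markers ls).map (· + 1))
        = pvStream markers [l0] ls := by
      have h0 := pv_main markers ls [] [l0]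
      simpa using h0
    have hB : pvStream markers [l0] ls
        = (let st := ls.foldl
            (fun (st : List String × List (List Char)) line =>
              if lineIsMarker markers line
              then (st.1 ++ [String.ofList (PySem.Chars.join ['\n'] st.2)], [line])
              else (st.1, st.2 ++ [line]))
            ([], [l0]);
           st.1 ++ [String.ofList (PySem.Chars.join ['\n'] st.2)]) := by
      rw [pv_stream_fold markers ls [] [l0]]
      simp
    exact hA.trans (hmain.trans hB)
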